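-- pv_equiv track=rewrite | github.com/mie-lab/bike_lane_optimization | scripts/rebuild_whole_city.py | try_fixing_highway_problem
-- ===== SOURCE A (Python) =====
-- def try_fixing_highway_problem(old_other_lanes, new_lanes):
--     """Small helper method to turn motorized into highways which does not work automatically"""
--     for ln in old_other_lanes:
--         if ln == "H>":
--             try:
--                 new_lanes.remove("M>")
--             except:
--                 pass
--         if ln == "H<":
--             try:
--                 new_lanes.remove("M<")
--             except:
--                 pass
--     new_lanes_string = " | ".join(old_other_lanes + new_lanes)
--     return new_lanes_string
-- ===== SOURCE B (Python) =====
-- def try_fixing_highway_problem(old_other_lanes, new_lanes):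
--     """Count removal budgets once, then filter new_lanes in a single pass.
--     Replicates A's in-place mutation of new_lanes via slice assignment."""
--     r_fwd = old_other_lanes.count("H>")
--     r_bwd = old_other_lanes.count("H<")
--     kept = []
--     for ln in new_lanes:
--         if ln == "M>" and r_fwd > 0:
--             r_fwd -= 1
--         elif ln == "M<" and r_bwd > 0:
--             r_bwd -= 1
--         else:
--             kept.append(ln)
--     new_lanes[:] = kept
--     return " | ".join(old_other_lanes + kept)
-- ===== Notes on version B (the rewrite author's own statement) =====
-- stated objective: simpler
-- what changed: Instead of repeatedly calling list.remove inside a loop over old_other_lanes (each remove rescans new_lanes), B counts the 'H>'/'H<' removal budgets once and filters new_lanes in a single pass with two decrementing counters, then replicates the in-place mutation via slice assignment.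
import Mathlib
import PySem

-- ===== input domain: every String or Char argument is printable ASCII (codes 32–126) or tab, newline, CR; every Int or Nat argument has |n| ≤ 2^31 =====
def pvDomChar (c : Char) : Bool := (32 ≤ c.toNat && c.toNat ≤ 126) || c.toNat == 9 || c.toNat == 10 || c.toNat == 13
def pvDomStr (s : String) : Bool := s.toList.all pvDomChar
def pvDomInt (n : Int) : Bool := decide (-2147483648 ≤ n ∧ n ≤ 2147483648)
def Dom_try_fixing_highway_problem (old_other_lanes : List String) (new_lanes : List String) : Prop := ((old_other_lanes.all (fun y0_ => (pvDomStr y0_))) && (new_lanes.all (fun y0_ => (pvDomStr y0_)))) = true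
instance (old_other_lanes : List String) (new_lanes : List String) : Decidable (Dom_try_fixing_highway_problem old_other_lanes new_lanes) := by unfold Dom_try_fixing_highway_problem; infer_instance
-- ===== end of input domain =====

-- B replaces A's repeated list.remove scans with counted budgets and one filtering pass (simpler);
-- equivalence is about the RETURN value only — the Python B replicates A's in-place mutation of new_lanes via slice assignment.

-- ===== PORT A =====
-- one iteration of A's for-loop body over ln, with state = current new_lanes
def pvStepA (ns : List String) (ln : String) : List String :=
  let ns := if ln = "H>" then
      (match PySem.List.remove? ns "M>" with    -- try: new_lanes.remove("M>") except: pass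
       | some l => l
       | none => ns)
    else ns
  if ln = "H<" then
      (match PySem.List.remove? ns "M<" with    -- try: new_lanes.remove("M<") except: pass
       | some l => l
       | none => ns)
    else ns

def try_fixing_highway_problem (old_other_lanes : List String) (new_lanes : List String) : String :=
  let new_lanes := old_other_lanes.foldl pvStepA new_lanes
  PySem.Str.join " | " (old_other_lanes ++ new_lanes)

-- ===== PORT B =====
-- Source B's single filtering pass: two decrementing budgets, keep everything else
def pvFilterB : List String → Nat → Nat → List String
  | [], _, _ => []
  | ln :: rest, rf, rb =>
    if ln = "M>" ∧ rf > 0 then pvFilterB rest (rf - 1) rb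
    else if ln = "M<" ∧ rb > 0 then pvFilterB rest rf (rb - 1)
    else ln :: pvFilterB rest rf rb

def try_fixing_highway_problem_alt (old_other_lanes : List String) (new_lanes : List String) : String :=
  let rf := PySem.List.count old_other_lanes "H>"
  let rb := PySem.List.count old_other_lanes "H<"
  let kept := pvFilterB new_lanes rf rb
  PySem.Str.join " | " (old_other_lanes ++ kept)

-- ===== PRECONDITION & SPEC =====
def Spec_try_fixing_highway_problem (old_other_lanes : List String) (new_lanes : List String) (out : String) : Prop := out = try_fixing_highway_problem_alt old_other_lanes new_lanes
instance (old_other_lanes : List String) (new_lanes : List String) (out : String) : Decidable (Spec_try_fixing_highway_problem old_other_lanes new_lanes out) := by unfold Spec_try_fixing_highway_problem; infer_instance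

-- ===== CLAIM (what is proved, stated in full; the proofs are below) =====
def Claim_equal_try_fixing_highway_problem : Prop := ∀ (old_other_lanes : List String) (new_lanes : List String), Dom_try_fixing_highway_problem old_other_lanes new_lanes → Spec_try_fixing_highway_problem old_other_lanes new_lanes (try_fixing_highway_problem old_other_lanes new_lanes)

-- ===== LEMMAS AND PROOFS =====

-- A's "remove or keep" step as a total function
def pvRemoveOr (ns : List String) (v : String) : List String :=
  match PySem.List.remove? ns v with
  | some l => l
  | none => ns

theorem pvRemoveOr_cons_self (xs : List String) (v : String) :
    pvRemoveOr (v :: xs) v = xs := by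
  simp [pvRemoveOr]

theorem pvRemoveOr_cons_of_ne (x : String) (xs : List String) (v : String) (h : x ≠ v) :
    pvRemoveOr (x :: xs) v = x :: pvRemoveOr xs v := by
  simp only [pvRemoveOr, PySem.List.remove?_cons_of_ne xs h]
  cases PySem.List.remove? xs v <;> simp

-- removing one leftmost "M>" before filtering = one more forward budget
theorem pvFilterB_removeOr_fwd (ns : List String) (rf rb : Nat) :
    pvFilterB (pvRemoveOr ns "M>") rf rb = pvFilterB ns (rf + 1) rb := by
  induction ns generalizing rf rb with
  | nil => simp [pvRemoveOr, PySem.List.remove?, pvFilterB]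
  | cons x xs ih =>
    by_cases hx : x = "M>"
    · subst hx
      rw [pvRemoveOr_cons_self]
      simp [pvFilterB]
    · rw [pvRemoveOr_cons_of_ne x xs _ hx]
      by_cases hb : x = "M<" ∧ rb > 0
      · simp [pvFilterB, hb, ih]
      · simp [pvFilterB, hx, hb, ih]

-- removing one leftmost "M<" before filtering = one more backward budget
theorem pvFilterB_removeOr_bwd (ns : List String) (rf rb : Nat) :
    pvFilterB (pvRemoveOr ns "M<") rf rb = pvFilterB ns rf (rb + 1) := by
  induction ns generalizing rf rb with
  | nil => simp [pvRemoveOr, PySem.List.remove?, pvFilterB]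
  | cons x xs ih =>
    by_cases hx : x = "M<"
    · subst hx
      by_cases hf : rf > 0
      · rw [pvRemoveOr_cons_self]
        simp [pvFilterB, hf]
      · rw [pvRemoveOr_cons_self]
        simp [pvFilterB, hf]
    · rw [pvRemoveOr_cons_of_ne x xs _ hx]
      by_cases hf : x = "M>" ∧ rf > 0
      · simp [pvFilterB, hf, ih]
      · simp [pvFilterB, hx, hf, ih]

-- with no budgets, the filter keeps everything
theorem pvFilterB_zero_zero (ns : List String) : pvFilterB ns 0 0 = ns := by
  induction ns with
  | nil => rfl
  | cons x xs ih => simp [pvFilterB, ih]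

-- A's whole loop equals B's single counted pass
theorem pvLoop_eq_filter (old : List String) (ns : List String) :
    old.foldl pvStepA ns
      = pvFilterB ns (PySem.List.count old "H>") (PySem.List.count old "H<") := by
  induction old generalizing ns with
  | nil =>
    simpa [PySem.List.count] using (pvFilterB_zero_zero ns).symm
  | cons ln rest ih =>
    rw [List.foldl_cons, ih]
    by_cases h1 : ln = "H>"
    · subst h1
      have hstep : pvStepA ns "H>" = pvRemoveOr ns "M>" := by
        simp [pvStepA, pvRemoveOr]
      rw [hstep, pvFilterB_removeOr_fwd]
      simp [PySem.List.count]
    · by_cases h2 : ln = "H<"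
      · subst h2
        have hstep : pvStepA ns "H<" = pvRemoveOr ns "M<" := by
          simp [pvStepA, pvRemoveOr]
        rw [hstep, pvFilterB_removeOr_bwd]
        simp [PySem.List.count]
      · have hstep : pvStepA ns ln = ns := by simp [pvStepA, h1, h2]
        rw [hstep]
        simp [PySem.List.count, h1, h2]

-- ===== VERDICT (by name: the statement is the Claim_ definition above) =====
theorem try_fixing_highway_problem_spec : Claim_equal_try_fixing_highway_problem := by
  intro old new _
  unfold Spec_try_fixing_highway_problem try_fixing_highway_problem try_fixing_highway_problem_alt
  rw [pvLoop_eq_filter]
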